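-- pv_equiv track=rewrite | github.com/eduairet/advent-js | 2024/day17.py | detect_bombs
-- ===== SOURCE A (Python) =====
-- def detect_bombs(grid):
--     result = [[0 for _ in row] for row in grid]
--     rows = len(grid)
--     cols = len(grid[0]) if grid else 0
--     directions = [(-1, -1), (-1, 0), (-1, 1), (0, -1), (0, 1), (1, -1), (1, 0), (1, 1)]
--     for y in range(rows):
--         for x in range(cols):
--             result[y][x] = sum(
--                 grid[y + dy][x + dx]
--                 for dy, dx in directions
--                 if 0 <= y + dy < rows and 0 <= x + dx < cols
--             )
--     return result
-- ===== SOURCE B (Python) =====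
-- def detect_bombs(grid):
--     rows = len(grid)
--     cols = len(grid[0]) if grid else 0
--     # horizontal pass: clamped 3-term sums within each row
--     H = [[(row[x - 1] if x > 0 else 0) + row[x] + (row[x + 1] if x + 1 < cols else 0)
--           for x in range(cols)] for row in grid]
--     # vertical pass: combine the horizontal sums above/at/below, minus the centre cell
--     result = [[0] * len(row) for row in grid]
--     for y, row in enumerate(grid):
--         for x in range(cols):
--             v = H[y][x]
--             if y > 0:
--                 v += H[y - 1][x]
--             if y + 1 < rows:
--                 v += H[y + 1][x]
--             result[y][x] = v - row[x]
--     return result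
-- ===== Notes on version B (the rewrite author's own statement) =====
-- stated objective: faster
-- what changed: A gathers the 8 neighbours of every cell from a directions list with per-cell bounds checks inside a generator; B computes the convolution separably: one horizontal pass builds a table of clamped 3-term row sums, then a vertical pass adds the three horizontal sums around each cell and subtracts the centre, cutting per-cell work from 8 guarded 2D lookups to about 4 additions. Pre_ excludes grids with a row shorter than the first row, on which A raises IndexError (B raises there too).
import Mathlib
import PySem

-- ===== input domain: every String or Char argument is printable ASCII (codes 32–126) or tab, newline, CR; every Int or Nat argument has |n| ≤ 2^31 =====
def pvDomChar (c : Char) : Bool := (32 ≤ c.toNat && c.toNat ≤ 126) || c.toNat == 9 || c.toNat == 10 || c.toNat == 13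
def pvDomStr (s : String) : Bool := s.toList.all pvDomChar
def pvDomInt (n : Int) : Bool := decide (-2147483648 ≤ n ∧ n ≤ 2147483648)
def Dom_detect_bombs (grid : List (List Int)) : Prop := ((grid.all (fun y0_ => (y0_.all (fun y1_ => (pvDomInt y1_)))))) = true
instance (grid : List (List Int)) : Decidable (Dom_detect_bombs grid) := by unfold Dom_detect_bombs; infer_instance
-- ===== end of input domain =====

-- B replaces A's per-cell gather over an 8-direction list by a separable convolution:
-- a horizontal pass of clamped 3-term row sums, then a vertical pass minus the centre,
-- (objective: faster by a constant factor, measured).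

-- ===== PORT A =====
-- the `directions` list of A, as Int pairs
def pvDirs : List (Int × Int) :=
  [(-1, -1), (-1, 0), (-1, 1), (0, -1), (0, 1), (1, -1), (1, 0), (1, 1)]

-- sum(grid[y+dy][x+dx] for dy,dx in directions if 0 <= y+dy < rows and 0 <= x+dx < cols):
-- the guarded generator sum as a foldl; rows/cols inlined (A computes them once from the
-- same grid); the guard puts both indices in range, so getD equals Python's indexing there.
def pvACell (grid : List (List Int)) (y x : Nat) : Int :=
  pvDirs.foldl (fun s d =>
    if 0 ≤ (y : Int) + d.1 ∧ (y : Int) + d.1 < (grid.length : Int) ∧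
       0 ≤ (x : Int) + d.2 ∧ (x : Int) + d.2 < ((grid.headD []).length : Int) then
      s + (grid.getD ((y : Int) + d.1).toNat []).getD ((x : Int) + d.2).toNat 0
    else s) 0

-- result = [[0 for _ in row] for row in grid]; then the two nested range loops assign
-- result[y][x] (List.modify/List.set; Pre_ keeps every assignment in range, as in Python).
-- `len(grid[0]) if grid else 0` = (grid.headD []).length.
def detect_bombs (grid : List (List Int)) : List (List Int) :=
  (List.range grid.length).foldl
    (fun res y =>
      (List.range (grid.headD []).length).foldl
        (fun res x => res.modify y (fun r => r.set x (pvACell grid y x))) res)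
    (grid.map (fun row => row.map (fun _ => (0 : Int))))

-- ===== PORT B =====
-- one H row: [(row[x-1] if x>0 else 0) + row[x] + (row[x+1] if x+1<cols else 0) for x in range(cols)]
def pvHRow (cols : Nat) (row : List Int) : List Int :=
  (List.range cols).map (fun x =>
    (if 0 < x then row.getD (x - 1) 0 else 0) + row.getD x 0 +
      (if x + 1 < cols then row.getD (x + 1) 0 else 0))

-- v = H[y][x]; if y > 0: v += H[y-1][x]; if y+1 < rows: v += H[y+1][x]; v - row[x]
def pvBCell (H : List (List Int)) (rows y x : Nat) (row : List Int) : Int :=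
  (H.getD y []).getD x 0 + (if 0 < y then (H.getD (y - 1) []).getD x 0 else 0) +
    (if y + 1 < rows then (H.getD (y + 1) []).getD x 0 else 0) - row.getD x 0

-- H = [...]; result = [[0]*len(row) for row in grid]; then the fill loops
-- (`for y, row in enumerate(grid)` rendered as y over range(len(grid)) with row = grid[y]).
def detect_bombs_alt (grid : List (List Int)) : List (List Int) :=
  let H := grid.map (pvHRow (grid.headD []).length)
  (List.range grid.length).foldl
    (fun res y =>
      (List.range (grid.headD []).length).foldl
        (fun res x =>
          res.modify y (fun r => r.set x (pvBCell H grid.length y x (grid.getD y [])))) res)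
    (grid.map (fun row => row.map (fun _ => (0 : Int))))

-- ===== PRECONDITION & SPEC =====
-- Pre_ admits exactly the inputs on which Python A returns: a row shorter than the first row
-- makes A raise IndexError (at result[y][x] = … or grid[y+dy][x+dx]); B raises there too.
def Pre_detect_bombs (grid : List (List Int)) : Prop :=
  ∀ row ∈ grid, (grid.headD []).length ≤ row.length

instance (grid : List (List Int)) : Decidable (Pre_detect_bombs grid) := by
  unfold Pre_detect_bombs; infer_instance

def pvWitness_detect_bombs : List (List Int) := [[1, 2], [3, 4]]

def Spec_detect_bombs (grid : List (List Int)) (out : List (List Int)) : Prop :=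
  out = detect_bombs_alt grid
instance (grid : List (List Int)) (out : List (List Int)) : Decidable (Spec_detect_bombs grid out) := by
  unfold Spec_detect_bombs; infer_instance

-- ===== CLAIM (what is proved, stated in full; the proofs are below) =====
def Claim_equal_detect_bombs : Prop :=
  ∀ (grid : List (List Int)), Dom_detect_bombs grid → Pre_detect_bombs grid →
    Spec_detect_bombs grid (detect_bombs grid)

-- ===== LEMMAS AND PROOFS =====

theorem pv_foldl_congr {α : Type} :
    ∀ (l : List Nat) (f g : α → Nat → α) (a : α),
      (∀ x ∈ l, ∀ b : α, f b x = g b x) → l.foldl f a = l.foldl g a := by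
  intro l
  induction l with
  | nil => intro f g a _; rfl
  | cons c l ih =>
    intro f g a h
    simp only [List.foldl_cons]
    rw [h c (List.mem_cons_self) a]
    exact ih f g _ (fun x hx b => h x (List.mem_cons_of_mem c hx) b)

theorem pv_getD_map (f : List Int → List Int) (l : List (List Int)) (i : Nat) :
    (l.map f).getD i [] = if i < l.length then f (l.getD i []) else [] := by
  by_cases h : i < l.length
  · simp [List.getD, h]
  · simp [List.getD, h]

theorem pv_hrow_getD (cols : Nat) (row : List Int) (x : Nat) :
    (pvHRow cols row).getD x 0
      = if x < cols then
          (if 0 < x then row.getD (x - 1) 0 else 0) + row.getD x 0 +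
            (if x + 1 < cols then row.getD (x + 1) 0 else 0)
        else 0 := by
  by_cases h : x < cols
  · simp [pvHRow, List.getD, h]
  · simp [pvHRow, List.getD, h]

-- the explicit horizontal 3-term sum at row y (proof-only abbreviation)
def pvH (grid : List (List Int)) (cols y x : Nat) : Int :=
  (if 0 < x then (grid.getD y []).getD (x - 1) 0 else 0) + (grid.getD y []).getD x 0 +
    (if x + 1 < cols then (grid.getD y []).getD (x + 1) 0 else 0)

theorem pv_H_lookup (grid : List (List Int)) (cols y x : Nat)
    (hy : y < grid.length) (hx : x < cols) :
    ((grid.map (pvHRow cols)).getD y []).getD x 0 = pvH grid cols y x := by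
  rw [pv_getD_map, if_pos hy, pv_hrow_getD, if_pos hx, pvH]

theorem pv_ite_add (c : Prop) [Decidable c] (s t : Int) :
    (if c then s + t else s) = s + (if c then t else 0) := by
  split <;> simp

theorem pv_cell_eq (grid : List (List Int)) (y x : Nat)
    (hy : y < grid.length) (hx : x < (grid.headD []).length) :
    pvACell grid y x
      = pvBCell (grid.map (pvHRow (grid.headD []).length)) grid.length y x (grid.getD y []) := by
  have L0 : ((grid.map (pvHRow (grid.headD []).length)).getD y []).getD x 0
      = pvH grid (grid.headD []).length y x := pv_H_lookup grid _ y x hy hx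
  have Lm : (if 0 < y then
        ((grid.map (pvHRow (grid.headD []).length)).getD (y - 1) []).getD x 0 else 0)
      = (if 0 < y then pvH grid (grid.headD []).length (y - 1) x else 0) := by
    split_ifs with h
    · exact pv_H_lookup grid _ (y - 1) x (by omega) hx
    · rfl
  have Lp : (if y + 1 < grid.length then
        ((grid.map (pvHRow (grid.headD []).length)).getD (y + 1) []).getD x 0 else 0)
      = (if y + 1 < grid.length then pvH grid (grid.headD []).length (y + 1) x else 0) := by
    split_ifs with h
    · exact pv_H_lookup grid _ (y + 1) x h hx
    · rfl
  rw [pvBCell, L0, Lm, Lp]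
  have e0 : ((y : Int) + 0).toNat = y := by omega
  have e1 : ((y : Int) + -1).toNat = y - 1 := by omega
  have e2 : ((x : Int) + -1).toNat = x - 1 := by omega
  have e3 : ((y : Int) + 1).toNat = y + 1 := by omega
  have e4 : ((x : Int) + 1).toNat = x + 1 := by omega
  have e5 : ((x : Int) + 0).toNat = x := by omega
  have c1 : (0 ≤ (y : Int) + -1 ∧ (y : Int) + -1 < (grid.length : Int) ∧
      0 ≤ (x : Int) + -1 ∧ (x : Int) + -1 < ((grid.headD []).length : Int)) ↔ (0 < y ∧ 0 < x) := by
    omega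
  have c2 : (0 ≤ (y : Int) + -1 ∧ (y : Int) + -1 < (grid.length : Int) ∧
      0 ≤ (x : Int) + 0 ∧ (x : Int) + 0 < ((grid.headD []).length : Int)) ↔ (0 < y) := by
    omega
  have c3 : (0 ≤ (y : Int) + -1 ∧ (y : Int) + -1 < (grid.length : Int) ∧
      0 ≤ (x : Int) + 1 ∧ (x : Int) + 1 < ((grid.headD []).length : Int)) ↔
      (0 < y ∧ x + 1 < (grid.headD []).length) := by omega
  have c4 : (0 ≤ (y : Int) + 0 ∧ (y : Int) + 0 < (grid.length : Int) ∧
      0 ≤ (x : Int) + -1 ∧ (x : Int) + -1 < ((grid.headD []).length : Int)) ↔ (0 < x) := by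
    omega
  have c5 : (0 ≤ (y : Int) + 0 ∧ (y : Int) + 0 < (grid.length : Int) ∧
      0 ≤ (x : Int) + 1 ∧ (x : Int) + 1 < ((grid.headD []).length : Int)) ↔
      (x + 1 < (grid.headD []).length) := by omega
  have c6 : (0 ≤ (y : Int) + 1 ∧ (y : Int) + 1 < (grid.length : Int) ∧
      0 ≤ (x : Int) + -1 ∧ (x : Int) + -1 < ((grid.headD []).length : Int)) ↔
      (y + 1 < grid.length ∧ 0 < x) := by omega
  have c7 : (0 ≤ (y : Int) + 1 ∧ (y : Int) + 1 < (grid.length : Int) ∧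
      0 ≤ (x : Int) + 0 ∧ (x : Int) + 0 < ((grid.headD []).length : Int)) ↔
      (y + 1 < grid.length) := by omega
  have c8 : (0 ≤ (y : Int) + 1 ∧ (y : Int) + 1 < (grid.length : Int) ∧
      0 ≤ (x : Int) + 1 ∧ (x : Int) + 1 < ((grid.headD []).length : Int)) ↔
      (y + 1 < grid.length ∧ x + 1 < (grid.headD []).length) := by omega
  simp only [pvACell, pvDirs, List.foldl_cons, List.foldl_nil, pv_ite_add,
    e0, e1, e2, e3, e4, e5, c1, c2, c3, c4, c5, c6, c7, c8, pvH]
  by_cases h1 : 0 < y <;> by_cases h2 : y + 1 < grid.length <;>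
    by_cases h3 : 0 < x <;> by_cases h4 : x + 1 < (grid.headD []).length <;>
    simp [h1, h2, h3, h4] <;> ring

-- ===== VERDICT (by name: the statement is the Claim_ definition above) =====
theorem detect_bombs_spec : Claim_equal_detect_bombs := by
  intro grid _dom _hpre
  unfold Spec_detect_bombs detect_bombs detect_bombs_alt
  apply pv_foldl_congr
  intro y hy res
  apply pv_foldl_congr
  intro x hx res'
  rw [pv_cell_eq grid y x (List.mem_range.mp hy) (List.mem_range.mp hx)]
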